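-- pv_equiv track=rewrite | github.com/marcelopederiva/CodeSignal | Arcade_Intro/alteratingSums.py | alternatingSums
-- ===== SOURCE A (Python) =====
-- def alternatingSums(a):
--     b = []
--     c = []
--     d = []
--     for i in range(0,len(a)):
--         if i%2 == 0:
--             b.append(a[i])
--         elif i%2!=0:
--             c.append(a[i])
--     d.append(sum(b))
--     d.append(sum(c))
--     return d
-- ===== SOURCE B (Python) =====
-- def alternatingSums(a):
--     return [sum(a[::2]), sum(a[1::2])]
-- ===== Notes on version B (the rewrite author's own statement) =====
-- stated objective: idiomatic
-- what changed: Replaces the index loop with a parity branch filling two bucket lists by summing the two strided slices a[::2] and a[1::2] directly.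
import Mathlib
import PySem

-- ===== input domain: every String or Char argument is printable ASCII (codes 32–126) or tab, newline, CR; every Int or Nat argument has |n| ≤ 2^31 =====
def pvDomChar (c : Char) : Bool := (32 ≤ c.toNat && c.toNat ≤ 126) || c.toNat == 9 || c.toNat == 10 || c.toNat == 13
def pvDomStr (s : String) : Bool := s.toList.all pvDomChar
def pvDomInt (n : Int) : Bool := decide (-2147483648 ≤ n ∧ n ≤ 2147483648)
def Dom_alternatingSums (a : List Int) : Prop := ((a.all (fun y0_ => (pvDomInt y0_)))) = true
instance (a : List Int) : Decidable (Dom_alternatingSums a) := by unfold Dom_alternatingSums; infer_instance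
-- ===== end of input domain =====

-- B replaces A's index loop (parity branch filling two bucket lists) by summing the two strided slices a[::2] and a[1::2]; same cost, more idiomatic.

-- ===== PORT A =====
-- the loop 'for i in range(0, len(a))' with the parity branch appending a[i] to b or c
def alternatingSums (a : List Int) : List Int :=
  let bc := (PySem.List.pyRange 0 (a.length : Int) 1).foldl
    (fun (bc : List Int × List Int) i =>
      if PySem.Int.mod i 2 == 0 then (bc.1 ++ [PySem.List.pyGetD a i 0], bc.2)
      else if PySem.Int.mod i 2 != 0 then (bc.1, bc.2 ++ [PySem.List.pyGetD a i 0])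
      else bc) ([], [])
  -- d = []; d.append(sum(b)); d.append(sum(c)); return d
  ([] ++ [bc.1.sum]) ++ [bc.2.sum]

-- ===== PORT B =====
-- a[::2] and a[1::2]; the '.getD []' defaults are never taken: slice? is none only for step 0
def alternatingSums_alt (a : List Int) : List Int :=
  [((PySem.List.slice? a none none 2).getD []).sum,
   ((PySem.List.slice? a (some 1) none 2).getD []).sum]

-- ===== PRECONDITION & SPEC =====
def Spec_alternatingSums (a : List Int) (out : List Int) : Prop := out = alternatingSums_alt a
instance (a : List Int) (out : List Int) : Decidable (Spec_alternatingSums a out) := by unfold Spec_alternatingSums; infer_instance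

-- ===== CLAIM (what is proved, stated in full; the proofs are below) =====
def Claim_equal_alternatingSums : Prop := ∀ (a : List Int), Dom_alternatingSums a → Spec_alternatingSums a (alternatingSums a)

-- ===== LEMMAS AND PROOFS =====

-- the even-indexed elements of a list (= a[::2]); a[1::2] is stride2 (a.drop 1)
def stride2 : List Int → List Int
  | [] => []
  | [x] => [x]
  | x :: _ :: rest => x :: stride2 rest

theorem stride2_cons (z : Int) (r : List Int) : stride2 (z :: r) = z :: stride2 (r.drop 1) := by
  cases r <;> simp [stride2]

-- the common filterMap shape that slice? with step 2 and no stop reduces to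
theorem filterMap_two (a : List Int) :
    List.filterMap (fun (k : Nat) => a[(2 * (k : Int)).toNat]?)
      (List.range (if 0 < a.length then (((a.length : Int) + 2 - 1) / 2).toNat else 0))
      = stride2 a := by
  induction a using stride2.induct with
  | case1 => simp [stride2]
  | case2 x => simp [stride2]
  | case3 x y rest ih =>
    simp only [stride2, List.length_cons]
    have hc : (if 0 < rest.length + 1 + 1 then ((((rest.length + 1 + 1 : Nat) : Int) + 2 - 1) / 2).toNat else 0)
        = (if 0 < rest.length then (((rest.length : Int) + 2 - 1) / 2).toNat else 0) + 1 := by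
      split_ifs <;> push_cast <;> omega
    rw [hc, List.range_succ_eq_map, List.filterMap_cons, List.filterMap_map]
    simp only [Nat.cast_zero, mul_zero, Int.toNat_zero, List.getElem?_cons_zero, Function.comp]
    have harg : (fun (k : Nat) => (x :: y :: rest)[(2 * ((k.succ : Nat) : Int)).toNat]?)
        = fun (k : Nat) => rest[(2 * (k : Int)).toNat]? := by
      funext k
      have h2 : (2 * ((k.succ : Nat) : Int)).toNat = 2 * k + 2 := by push_cast; omega
      have h3 : (2 * (k : Int)).toNat = 2 * k := by omega
      rw [h2, h3]; simp
    rw [harg, ih]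

theorem slice_even (a : List Int) : PySem.List.slice? a none none 2 = some (stride2 a) := by
  simp only [PySem.List.slice?, PySem.List.sliceIndices]
  norm_num
  exact filterMap_two a

theorem slice_odd (a : List Int) : PySem.List.slice? a (some 1) none 2 = some (stride2 (a.drop 1)) := by
  cases a with
  | nil => simp [PySem.List.slice?, PySem.List.sliceIndices, stride2]
  | cons x rest =>
    simp only [PySem.List.slice?, PySem.List.sliceIndices]
    norm_num
    have harg : (fun (k : Nat) => (x :: rest)[(1 + 2 * (k : Int)).toNat]?)
        = fun (k : Nat) => rest[(2 * (k : Int)).toNat]? := by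
      funext k
      have h2 : (1 + 2 * (k : Int)).toNat = 2 * k + 1 := by omega
      have h3 : (2 * (k : Int)).toNat = 2 * k := by omega
      rw [h2, h3]; simp
    rw [harg, filterMap_two rest]

-- A's loop body, named so the invariant lemma can talk about it
def stepA (a : List Int) (bc : List Int × List Int) (i : Int) : List Int × List Int :=
  if PySem.Int.mod i 2 == 0 then (bc.1 ++ [PySem.List.pyGetD a i 0], bc.2)
  else if PySem.Int.mod i 2 != 0 then (bc.1, bc.2 ++ [PySem.List.pyGetD a i 0])
  else bc

-- invariant of A's index loop over the suffix 'suf' of a = pre ++ suf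
theorem foldA (suf : List Int) : ∀ (pre b c : List Int),
    (PySem.List.pyRange (pre.length : Int) ((pre.length : Int) + (suf.length : Int)) 1).foldl
        (stepA (pre ++ suf)) (b, c)
      = if pre.length % 2 = 0 then (b ++ stride2 suf, c ++ stride2 (suf.drop 1))
        else (b ++ stride2 (suf.drop 1), c ++ stride2 suf) := by
  induction suf with
  | nil =>
    intro pre b c
    rw [PySem.List.pyRange_one_eq_nil (by simp)]
    simp [stride2]
  | cons z rest ih =>
    intro pre b c
    have hlt : (pre.length : Int) < (pre.length : Int) + ((z :: rest).length : Int) := by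
      simp
    rw [PySem.List.pyRange_one_cons hlt, List.foldl_cons]
    have hget : PySem.List.pyGetD (pre ++ z :: rest) (pre.length : Int) 0 = z := by
      rw [PySem.List.pyGetD_natCast]
      simp [List.getD_eq_getElem?_getD]
    have hmod : PySem.Int.mod (pre.length : Int) 2 = ((pre.length % 2 : Nat) : Int) :=
      PySem.Int.mod_natCast pre.length 2
    have hlen : ((z :: rest).length : Int) = (rest.length : Int) + 1 := by simp
    have happ : pre ++ z :: rest = (pre ++ [z]) ++ rest := by simp
    have hrange : (pre.length : Int) + 1 = (((pre ++ [z]).length : Nat) : Int) := by simp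
    by_cases hp : pre.length % 2 = 0
    · rw [if_pos hp]
      have : stepA (pre ++ z :: rest) (b, c) (pre.length : Int)
          = (b ++ [z], c) := by
        simp [stepA, hget]
        exact fun h => absurd h (by omega)
      rw [this, hlen, happ]
      have := ih (pre ++ [z]) (b ++ [z]) c
      rw [List.length_append] at this
      simp only [List.length_cons, List.length_nil] at this ⊢
      have hpo : (pre.length + 1) % 2 ≠ 0 := by omega
      rw [if_neg hpo] at this
      have hr : ((pre.length : Int) + ((rest.length : Int) + 1)) = (((pre.length + 1 : Nat) : Int) + (rest.length : Int)) := by push_cast; omega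
      rw [hr]
      push_cast at this ⊢
      rw [this, stride2_cons]
      simp
    · rw [if_neg hp]
      have : stepA (pre ++ z :: rest) (b, c) (pre.length : Int)
          = (b, c ++ [z]) := by
        simp [stepA, hget]
        rw [if_neg (by omega), if_pos (by omega)]
      rw [this, hlen, happ]
      have := ih (pre ++ [z]) b (c ++ [z])
      rw [List.length_append] at this
      simp only [List.length_cons, List.length_nil] at this ⊢
      have hpo : (pre.length + 1) % 2 = 0 := by omega
      rw [if_pos hpo] at this
      have hr : ((pre.length : Int) + ((rest.length : Int) + 1)) = (((pre.length + 1 : Nat) : Int) + (rest.length : Int)) := by push_cast; omega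
      rw [hr]
      push_cast at this ⊢
      rw [this, stride2_cons]
      simp

theorem alternatingSums_eq (a : List Int) :
    alternatingSums a = [(stride2 a).sum, (stride2 (a.drop 1)).sum] := by
  have h := foldA a [] [] []
  simp only [List.length_nil, Nat.cast_zero, zero_add, List.nil_append, Nat.zero_mod] at h
  unfold alternatingSums
  rw [show (fun (bc : List Int × List Int) i =>
      if PySem.Int.mod i 2 == 0 then (bc.1 ++ [PySem.List.pyGetD a i 0], bc.2)
      else if PySem.Int.mod i 2 != 0 then (bc.1, bc.2 ++ [PySem.List.pyGetD a i 0])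
      else bc) = stepA a from rfl]
  rw [h]
  simp

-- ===== VERDICT (by name: the statement is the Claim_ definition above) =====
theorem alternatingSums_spec : Claim_equal_alternatingSums := by
  intro a _
  unfold Spec_alternatingSums alternatingSums_alt
  rw [slice_even, slice_odd, alternatingSums_eq]
  rfl
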